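-- pv_equiv track=rewrite | github.com/edvardwd/Kattis | shuffling/main.py | inShuffle
-- ===== SOURCE A (Python) =====
-- def inShuffle(deck: list[int]) -> list[int]:
--     middle = len(deck) // 2
--     shuffled = []
--     topHalf = deck[:middle]
--     bottomHalf = deck[middle:]
--
--     while len(topHalf) > 0:
--         shuffled.append(bottomHalf.pop(0))
--         shuffled.append(topHalf.pop(0))
--     if len(bottomHalf) > 0:
--         shuffled += bottomHalf
--     return shuffled
-- ===== SOURCE B (Python) =====
-- def inShuffle(deck: list[int]) -> list[int]:
--     # Gather by the in-shuffle index formula: position k takes the (k//2)-th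
--     # card of the bottom half (k even) or of the top half (k odd).
--     n = len(deck)
--     middle = n // 2
--     return [deck[k // 2] if k % 2 else deck[middle + k // 2] for k in range(n)]
-- ===== Notes on version B (the rewrite author's own statement) =====
-- stated objective: faster
-- what changed: Replaces the split-into-halves-and-pop(0) loop with a single comprehension that gathers each output position from its source index by the in-shuffle formula (k even -> bottom half, k odd -> top half).
import Mathlib
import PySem

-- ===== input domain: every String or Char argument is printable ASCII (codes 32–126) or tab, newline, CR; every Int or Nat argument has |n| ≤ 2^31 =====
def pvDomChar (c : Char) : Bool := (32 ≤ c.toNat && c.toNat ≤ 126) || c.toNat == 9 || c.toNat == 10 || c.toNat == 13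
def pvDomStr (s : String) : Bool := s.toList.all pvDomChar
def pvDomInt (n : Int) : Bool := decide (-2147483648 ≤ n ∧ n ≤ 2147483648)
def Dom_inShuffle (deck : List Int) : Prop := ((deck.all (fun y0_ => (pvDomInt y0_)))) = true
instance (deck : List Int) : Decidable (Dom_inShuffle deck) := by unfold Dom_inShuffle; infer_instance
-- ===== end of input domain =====

-- B replaces A's split-and-pop(0) loop by a one-pass gather from formula-computed
-- source indices (the in-shuffle permutation); return values are proved equal.

-- ===== PORT A =====
-- while len(topHalf) > 0: shuffled.append(bottomHalf.pop(0)); shuffled.append(topHalf.pop(0))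
-- then: if len(bottomHalf) > 0: shuffled += bottomHalf  (appending [] is the identity, so the guard is dropped)
def inShuffleLoop : List Int → List Int → List Int → List Int
  | [], bottom, shuffled => shuffled ++ bottom
  | _ :: _, [], shuffled => shuffled  -- unreachable: bottomHalf is never shorter than topHalf (Python would raise IndexError here)
  | t :: ts, b :: bs, shuffled => inShuffleLoop ts bs (shuffled ++ [b, t])

def inShuffle (deck : List Int) : List Int :=
  let middle : Int := PySem.Int.floordiv (deck.length : Int) 2
  inShuffleLoop (PySem.List.slice deck none (some middle)) (PySem.List.slice deck (some middle) none) []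

-- ===== PORT B =====
-- [deck[k // 2] if k % 2 else deck[middle + k // 2] for k in range(n)]
-- indices are always in range here, so pyGetD with default 0 is exact (never hits the default)
def inShuffle_alt (deck : List Int) : List Int :=
  let n := deck.length
  let middle := n / 2
  (PySem.List.pyRange 0 (n : Int) 1).map (fun k =>
    if PySem.Int.mod k 2 ≠ 0 then PySem.List.pyGetD deck (PySem.Int.floordiv k 2) 0
    else PySem.List.pyGetD deck ((middle : Int) + PySem.Int.floordiv k 2) 0)

-- ===== PRECONDITION & SPEC =====
def Spec_inShuffle (deck : List Int) (out : List Int) : Prop := out = inShuffle_alt deck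
instance (deck : List Int) (out : List Int) : Decidable (Spec_inShuffle deck out) := by unfold Spec_inShuffle; infer_instance

-- ===== CLAIM (what is proved, stated in full; the proofs are below) =====
def Claim_equal_inShuffle : Prop := ∀ (deck : List Int), Dom_inShuffle deck → Spec_inShuffle deck (inShuffle deck)

-- ===== LEMMAS AND PROOFS =====

-- pure interleave: b0, t0, b1, t1, …, then the leftover of b
def itlv : List Int → List Int → List Int
  | b :: bs, t :: ts => b :: t :: itlv bs ts
  | bs, [] => bs
  | [], _ :: _ => []

theorem inShuffleLoop_eq (top bottom acc : List Int) (h : top.length ≤ bottom.length) :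
    inShuffleLoop top bottom acc = acc ++ itlv bottom top := by
  induction top generalizing bottom acc with
  | nil => cases bottom <;> simp [inShuffleLoop, itlv]
  | cons t ts ih =>
    cases bottom with
    | nil => simp at h
    | cons b bs =>
      simp only [inShuffleLoop, itlv]
      rw [ih bs (acc ++ [b, t]) (by simpa using h)]
      simp

theorem itlv_length (b t : List Int) (h : t.length ≤ b.length) :
    (itlv b t).length = b.length + t.length := by
  induction b generalizing t with
  | nil =>
    cases t with
    | nil => simp [itlv]
    | cons x xs => simp at h
  | cons x xs ih =>
    cases t with
    | nil => simp [itlv]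
    | cons y ys =>
      simp only [itlv, List.length_cons]
      rw [ih ys (by simpa using h)]
      omega

theorem itlv_getElem (b t : List Int) (h : t.length ≤ b.length) (h2 : b.length ≤ t.length + 1)
    (k : Nat) (hk : k < (itlv b t).length) :
    (itlv b t)[k] = if k % 2 = 0 then b.getD (k / 2) 0 else t.getD (k / 2) 0 := by
  induction b generalizing t k with
  | nil =>
    cases t with
    | nil => simp [itlv] at hk
    | cons y ys => simp at h
  | cons x xs ih =>
    cases t with
    | nil =>
      have hxs : xs = [] := by
        cases xs with
        | nil => rfl
        | cons z zs => simp at h2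
      subst hxs
      have hk0 : k = 0 := by simpa [itlv] using hk
      subst hk0; simp [itlv]
    | cons y ys =>
      match k with
      | 0 => simp [itlv]
      | 1 => simp [itlv]
      | k + 2 =>
        simp only [itlv, List.getElem_cons_succ]
        rw [ih ys (by simpa using h) (by simpa using h2) k (by simpa [itlv] using hk)]
        have e1 : (k + 2) % 2 = k % 2 := by omega
        have e2 : (k + 2) / 2 = k / 2 + 1 := by omega
        simp [e1, e2]

theorem inShuffle_eq_itlv (deck : List Int) :
    inShuffle deck = itlv (deck.drop (deck.length / 2)) (deck.take (deck.length / 2)) := by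
  show inShuffleLoop (PySem.List.slice deck none (some (PySem.Int.floordiv (deck.length : Int) 2)))
      (PySem.List.slice deck (some (PySem.Int.floordiv (deck.length : Int) 2)) none) [] = _
  have hm : PySem.Int.floordiv (deck.length : Int) 2 = ((deck.length / 2 : Nat) : Int) := by
    exact_mod_cast PySem.Int.floordiv_natCast deck.length 2
  rw [hm, PySem.List.slice_to_natCast, PySem.List.slice_from_natCast,
      inShuffleLoop_eq _ _ _ (by simp; omega)]
  simp

theorem inShuffle_alt_getElem (deck : List Int) (k : Nat) (hk : k < deck.length) :
    (inShuffle_alt deck)[k]'(by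
      unfold inShuffle_alt
      simp [PySem.List.length_pyRange_one]; omega) =
    if k % 2 = 0 then deck.getD (deck.length / 2 + k / 2) 0 else deck.getD (k / 2) 0 := by
  unfold inShuffle_alt
  rw [List.getElem_map, PySem.List.getElem_pyRange_one]
  have h2 : PySem.Int.mod ((0:Int) + (k:Int)) 2 = ((k % 2 : Nat) : Int) := by
    rw [zero_add]; exact_mod_cast PySem.Int.mod_natCast k 2
  have h3 : PySem.Int.floordiv ((0:Int) + (k:Int)) 2 = ((k / 2 : Nat) : Int) := by
    rw [zero_add]; exact_mod_cast PySem.Int.floordiv_natCast k 2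
  have h4 : ((deck.length / 2 : Nat) : Int) + ((k / 2 : Nat) : Int)
      = (((deck.length / 2 + k / 2 : Nat)) : Int) := by push_cast; ring
  by_cases he : k % 2 = 0
  · rw [h2, h3, if_neg (by simp [he]), if_pos he, h4, PySem.List.pyGetD_natCast]
  · rw [h2, h3, if_pos (fun h => he (by exact_mod_cast h)), if_neg he, PySem.List.pyGetD_natCast]

theorem inShuffle_spec : Claim_equal_inShuffle := by
  intro deck _
  unfold Spec_inShuffle
  rw [inShuffle_eq_itlv]
  have hlen : (inShuffle_alt deck).length = deck.length := by
    unfold inShuffle_alt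
    simp [PySem.List.length_pyRange_one]
  have ht : (deck.take (deck.length / 2)).length ≤ (deck.drop (deck.length / 2)).length := by
    simp; omega
  have hb : (deck.drop (deck.length / 2)).length ≤ (deck.take (deck.length / 2)).length + 1 := by
    simp; omega
  apply List.ext_getElem
  · rw [itlv_length _ _ ht, hlen]; simp; omega
  · intro k hk1 hk2
    rw [hlen] at hk2
    rw [itlv_getElem _ _ ht hb k hk1, inShuffle_alt_getElem deck k hk2]
    by_cases he : k % 2 = 0
    · have hkk : deck.length / 2 + k / 2 < deck.length := by omega
      rw [if_pos he, if_pos he,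
          List.getD_eq_getElem _ _ (by simp; omega),
          List.getD_eq_getElem _ _ hkk,
          List.getElem_drop]
    · have hkk : k / 2 < deck.length / 2 := by omega
      rw [if_neg he, if_neg he,
          List.getD_eq_getElem _ _ (by simp; omega),
          List.getD_eq_getElem _ _ (by omega : k / 2 < deck.length),
          List.getElem_take]
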